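-- pv_equiv track=rewrite | github.com/aahamed/AlgoPractice | UCI/spring/week10/max_subarray.py | max_sub
-- ===== SOURCE A (Python) =====
-- def max_sub(A):
--     m_sum = A[0]
--     i = 0
--     while i < len(A) and A[i] <= 0:
--         if A[i] > m_sum:
--             m_sum = A[i]
--         i += 1
--
--     if i >= len(A):
--             return m_sum
--     m_sum = 0
--     for j in range(i, len(A)):
--         if A[j] > 0:
--             m_sum += A[j]
--     return m_sum
-- ===== SOURCE B (Python) =====
-- def max_sub(A):
--     total = sum(x for x in A if x > 0)
--     return total if total > 0 else max(A)
-- ===== Notes on version B (the rewrite author's own statement) =====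
-- stated objective: simpler
-- what changed: Replaces A's two-phase index scan (prefix max over the leading non-positives, then a positional sum loop) with a single filter-and-sum of the positive elements, falling back to max(A) when no positive exists.
import Mathlib
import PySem

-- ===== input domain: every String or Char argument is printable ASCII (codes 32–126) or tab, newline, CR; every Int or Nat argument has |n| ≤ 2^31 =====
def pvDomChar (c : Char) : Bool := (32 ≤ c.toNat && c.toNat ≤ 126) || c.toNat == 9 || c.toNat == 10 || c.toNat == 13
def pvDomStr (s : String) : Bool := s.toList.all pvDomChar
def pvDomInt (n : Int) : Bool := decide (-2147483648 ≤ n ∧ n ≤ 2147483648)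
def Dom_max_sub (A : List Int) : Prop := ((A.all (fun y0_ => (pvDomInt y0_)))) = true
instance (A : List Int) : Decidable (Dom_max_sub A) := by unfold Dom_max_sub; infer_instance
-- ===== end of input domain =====

-- B replaces A's two-phase index scan with one filter-and-sum plus a max(A) fallback (objective: simpler).
-- On the empty list both Pythons raise (A: IndexError, B: ValueError); that input is outside Pre_.

-- ===== PORT A =====
-- A's while loop: walk the leading non-positive elements, tracking the running max in m_sum;
-- returns the final m_sum and the remaining suffix (the suffix is [] iff i reached len(A)).
def maxSubWhile (rest : List Int) (msum : Int) : Int × List Int :=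
  match rest with
  | [] => (msum, [])
  | a :: t => if a ≤ 0 then maxSubWhile t (if a > msum then a else msum) else (msum, a :: t)

def max_sub (A : List Int) : Int :=
  match A with
  | [] => 0  -- Python raises IndexError on A[0] here; excluded by Pre_max_sub
  | a0 :: _ =>
    match maxSubWhile A a0 with
    | (msum, []) => msum
    | (_, rest) => rest.foldl (fun s x => if x > 0 then s + x else s) 0

-- ===== PORT B =====
def max_sub_alt (A : List Int) : Int :=
  let total := (A.filter (fun x => x > 0)).sum
  if total > 0 then total else (PySem.List.max? A (fun x => x)).getD 0

-- ===== PRECONDITION & SPEC =====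
-- Pre_ excludes only the empty list, on which both Pythons raise.
def Pre_max_sub (A : List Int) : Prop := A ≠ []
instance (A : List Int) : Decidable (Pre_max_sub A) := by unfold Pre_max_sub; infer_instance
def pvWitness_max_sub : List Int := [3, -1, 2]

def Spec_max_sub (A : List Int) (out : Int) : Prop := out = max_sub_alt A
instance (A : List Int) (out : Int) : Decidable (Spec_max_sub A out) := by unfold Spec_max_sub; infer_instance

-- ===== CLAIM (what is proved, stated in full; the proofs are below) =====
def Claim_equal_max_sub : Prop := ∀ (A : List Int), Dom_max_sub A → Pre_max_sub A → Spec_max_sub A (max_sub A)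

-- ===== LEMMAS AND PROOFS =====

-- The while loop computes (running max of the ≤0-prefix, the rest of the list).
theorem maxSubWhile_eq (L : List Int) (m : Int) :
    maxSubWhile L m =
      ((L.takeWhile (fun x => x ≤ 0)).foldl (fun s x => if x > s then x else s) m,
       L.dropWhile (fun x => x ≤ 0)) := by
  induction L generalizing m with
  | nil => simp [maxSubWhile]
  | cons a t ih =>
    by_cases h : a ≤ 0
    · simp [maxSubWhile, h, List.takeWhile, List.dropWhile, ih]
    · simp [maxSubWhile, h, List.takeWhile, List.dropWhile]

theorem foldl_runmax_eq_max (L : List Int) (m : Int) :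
    L.foldl (fun s x => if x > s then x else s) m = L.foldl max m := by
  induction L generalizing m with
  | nil => rfl
  | cons a t ih =>
    simp only [List.foldl]
    rw [ih]
    congr 1
    by_cases h : a > m <;> simp [h, max_comm] <;> omega

theorem foldl_posSum_eq_filter_sum (L : List Int) (s : Int) :
    L.foldl (fun s x => if x > 0 then s + x else s) s = s + (L.filter (fun x => x > 0)).sum := by
  induction L generalizing s with
  | nil => simp
  | cons a t ih =>
    by_cases h : a > 0
    · simp [List.foldl, h, ih]; ring
    · simp [List.foldl, h, ih]

theorem filter_pos_sum_pos (L : List Int) (hne : L.filter (fun x => x > 0) ≠ []) :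
    0 < (L.filter (fun x => x > 0)).sum := by
  induction L with
  | nil => simp at hne
  | cons a t ih =>
    by_cases h : a > 0
    · rw [List.filter_cons_of_pos (by simpa using h), List.sum_cons]
      by_cases ht : t.filter (fun x => x > 0) = []
      · rw [ht]; simp; omega
      · have := ih ht; omega
    · rw [List.filter_cons_of_neg (by simpa using h)] at hne ⊢
      exact ih hne

theorem filter_pos_takeWhile_nil (L : List Int) :
    (L.takeWhile (fun x => x ≤ 0)).filter (fun x => x > 0) = [] := by
  rw [List.filter_eq_nil_iff]
  intro x hx
  have := List.mem_takeWhile_imp hx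
  simp at this ⊢
  omega

-- ===== VERDICT (by name: the statement is the Claim_ definition above) =====
theorem max_sub_spec : Claim_equal_max_sub := by
  intro A _ hpre
  unfold Spec_max_sub
  match A with
  | [] => exact absurd rfl hpre
  | a0 :: t =>
    rw [show max_sub (a0 :: t)
          = (match maxSubWhile (a0 :: t) a0 with
             | (msum, []) => msum
             | (_, rest) => rest.foldl (fun s x => if x > 0 then s + x else s) 0) from rfl,
        maxSubWhile_eq]
    unfold max_sub_alt
    rcases hdrop : (a0 :: t).dropWhile (fun x => x ≤ 0) with _ | ⟨b, r⟩
    · -- the whole list is non-positive: A returns the running max, B returns max(A)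
      have htake : (a0 :: t).takeWhile (fun x => x ≤ 0) = (a0 :: t) := by
        have := List.takeWhile_append_dropWhile (p := fun x => x ≤ 0) (l := a0 :: t)
        rw [hdrop] at this; simpa using this
      have hfilter : (a0 :: t).filter (fun x => x > 0) = [] := by
        rw [← htake]; exact filter_pos_takeWhile_nil (a0 :: t)
      rw [hdrop, htake, hfilter]
      simp [PySem.List.max?_id_cons, foldl_runmax_eq_max]
    · -- a positive element exists: A sums the positives of the suffix, B sums all positives
      have hbpos : b > 0 := by
        have := List.head_dropWhile_not (p := fun x => decide (x ≤ 0)) (l := a0 :: t) (by rw [hdrop]; simp)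
        simp [hdrop] at this; omega
      have hsplit : (a0 :: t) = (a0 :: t).takeWhile (fun x => x ≤ 0) ++ (b :: r) := by
        conv_lhs => rw [← List.takeWhile_append_dropWhile (p := fun x => x ≤ 0) (l := a0 :: t)]
        rw [hdrop]
      have hfilter : (a0 :: t).filter (fun x => x > 0) = (b :: r).filter (fun x => x > 0) := by
        conv_lhs => rw [hsplit]
        rw [List.filter_append, filter_pos_takeWhile_nil, List.nil_append]
      have hne : (a0 :: t).filter (fun x => x > 0) ≠ [] := by
        rw [hfilter, List.filter_cons_of_pos (by simpa using hbpos)]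
        simp
      have hpos := filter_pos_sum_pos (a0 :: t) hne
      rw [hdrop]
      simp only [foldl_posSum_eq_filter_sum, zero_add, ← hfilter]
      rw [if_pos hpos]
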